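-- pv_equiv track=rewrite | github.com/mathias-kinninkpo/kattis | others/combine.py | combinason
-- ===== SOURCE A (Python) =====
-- def more_one_char(char):
--     return char if len(char) > 1 else 0
--
-- def delete(chaine):
--     while 0 in chaine:
--         del(chaine[chaine.index(0)])
--     return sorted(chaine, key= lambda x : len(x))
--
-- def combinason(string):
--     chaines = list()
--     n = 1
--     while n < len(string):
--         for i in range(len(string)):
--             for j in range(n, len(string)):
--                 chaines.append(string[i:n] + string[j])
--         n += 1
--     return delete(list(map(more_one_char , chaines)))
-- ===== SOURCE B (Python) =====
-- def combinason(string):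
--     # Generate the surviving combinations directly in increasing-length order
--     # (for fixed output length m the originals appear with n, j ascending),
--     # so no sort and no 0-sentinel/delete pass is needed.
--     L = len(string)
--     out = []
--     for m in range(2, L + 1):          # output length
--         for n in range(m - 1, L):      # prefix end; the only i kept is n - m + 1
--             for j in range(n, L):
--                 out.append(string[n - m + 1:n] + string[j])
--     return out
-- ===== Notes on version B (the rewrite author's own statement) =====
-- stated objective: faster
-- what changed: B emits the surviving combinations directly in increasing output-length order (for each length m the unique kept prefix start is i = n-m+1), eliminating the 0-sentinel list, the quadratic repeated index/del deletion pass and the final comparison sort.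
import Mathlib
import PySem

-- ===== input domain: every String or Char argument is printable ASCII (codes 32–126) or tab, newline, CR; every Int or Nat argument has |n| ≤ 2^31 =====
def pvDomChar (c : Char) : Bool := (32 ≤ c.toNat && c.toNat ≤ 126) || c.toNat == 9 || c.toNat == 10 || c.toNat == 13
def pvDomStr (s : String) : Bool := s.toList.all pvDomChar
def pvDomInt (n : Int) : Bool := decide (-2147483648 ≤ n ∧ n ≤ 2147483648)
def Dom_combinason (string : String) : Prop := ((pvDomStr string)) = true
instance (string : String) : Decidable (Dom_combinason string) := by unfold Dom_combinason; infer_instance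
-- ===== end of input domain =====

-- B generates the surviving combinations directly in increasing output-length order
-- (for each length m the unique kept prefix start is i = n-m+1), so the 0-sentinel list,
-- the repeated index/del deletion pass and the final sort of A all disappear (faster).


-- ===== PORT A =====
-- `char if len(char) > 1 else 0`: the int sentinel 0 is modelled as `none`
def pvMoreOneChar (s : String) : Option String :=
  if 1 < s.toList.length then some s else none

-- `while 0 in chaine: del chaine[chaine.index(0)]`: del at index(0) removes the
-- first occurrence of the sentinel, i.e. List.erase
def pvRemoveZeros (l : List (Option String)) : List (Option String) :=
  if h : none ∈ l then pvRemoveZeros (l.erase none) else l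
termination_by l.length
decreasing_by
  have h1 := List.length_erase_of_mem h
  have h2 : 0 < l.length := List.length_pos_of_mem h
  omega

-- `string[i:n] + string[j]` (shared expression of both Pythons); j is always in
-- range at every call site, so pyGetD's default is never used
def pvPiece (cs : List Char) (i n j : Int) : String :=
  String.ofList (PySem.List.slice cs (some i) (some n) ++ [PySem.List.pyGetD cs j ' '])

-- `sorted(chaine, key=lambda x: len(x))` after the deletion loop; every remaining
-- element is `some`, the key is the contained string's length, and the final map
-- unwraps the Option (Python's list holds the plain strings at this point)
def pvDelete (chaine : List (Option String)) : List String :=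
  (PySem.List.sorted (pvRemoveZeros chaine) (fun o => ((o.getD "").toList.length : Int)) false).map
    (fun o => o.getD "")

def combinason (string : String) : List String :=
  let cs := string.toList
  let L : Int := cs.length
  let chaines := (PySem.List.pyRange 1 L 1).foldl (fun acc n =>
    (PySem.List.pyRange 0 L 1).foldl (fun acc i =>
      (PySem.List.pyRange n L 1).foldl (fun acc j =>
        acc ++ [pvPiece cs i n j]) acc) acc) []
  pvDelete (chaines.map pvMoreOneChar)

-- ===== PORT B =====
def combinason_alt (string : String) : List String :=
  let cs := string.toList
  let L : Int := cs.length
  (PySem.List.pyRange 2 (L + 1) 1).foldl (fun acc m =>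
    (PySem.List.pyRange (m - 1) L 1).foldl (fun acc n =>
      (PySem.List.pyRange n L 1).foldl (fun acc j =>
        acc ++ [pvPiece cs (n - m + 1) n j]) acc) acc) []


-- ===== PRECONDITION & SPEC =====  (A is total: no Pre_)
def Spec_combinason (string : String) (out : List String) : Prop := out = combinason_alt string
instance (string : String) (out : List String) : Decidable (Spec_combinason string out) := by unfold Spec_combinason; infer_instance

-- ===== CLAIM (what is proved, stated in full; the proofs are below) =====
def Claim_equal_combinason : Prop := ∀ (string : String), Dom_combinason string → Spec_combinason string (combinason string)

-- ===== LEMMAS AND PROOFS =====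
def pvGen (cs : List Char) : List String :=
  (PySem.List.pyRange 1 (cs.length : Int) 1).flatMap fun n =>
    (PySem.List.pyRange 0 (cs.length : Int) 1).flatMap fun i =>
      (PySem.List.pyRange n (cs.length : Int) 1).flatMap fun j => [pvPiece cs i n j]

theorem pvCombinason_eq_gen (s : String) :
    combinason s = pvDelete ((pvGen s.toList).map pvMoreOneChar) := by
  unfold combinason pvGen
  simp only [PySem.List.foldl_append_eq_flatMap, List.nil_append]

theorem pvCombinason_alt_eq (s : String) :
    combinason_alt s =
      (PySem.List.pyRange 2 ((s.toList.length : Int) + 1) 1).flatMap fun m =>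
        (PySem.List.pyRange (m - 1) (s.toList.length : Int) 1).flatMap fun n =>
          (PySem.List.pyRange n (s.toList.length : Int) 1).flatMap fun j =>
            [pvPiece s.toList (n - m + 1) n j] := by
  unfold combinason_alt
  simp only [PySem.List.foldl_append_eq_flatMap, List.nil_append]

theorem pvPiece_length (cs : List Char) (i n j : Int) (h0 : 0 ≤ i) (h1 : 0 ≤ n)
    (h2 : n.toNat ≤ cs.length) :
    (pvPiece cs i n j).toList.length = n.toNat - i.toNat + 1 := by
  unfold pvPiece
  rw [String.toList_ofList]
  rw [← Int.toNat_of_nonneg h0, ← Int.toNat_of_nonneg h1, PySem.List.slice_natCast]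
  simp only [List.length_append, List.length_cons, List.length_nil, List.length_take,
    List.length_drop]
  omega

theorem pvFlatMap_nil {α β : Type} (l : List α) (f : α → List β)
    (h : ∀ x ∈ l, f x = []) : l.flatMap f = [] := by
  induction l with
  | nil => simp
  | cons a t ih => simp [h a (by simp), ih (fun x hx => h x (by simp [hx]))]

theorem pvFlatMap_single {α β : Type} (l : List α) (f : α → List β) (a : α)
    (hnd : l.Nodup) (ha : a ∈ l) (h : ∀ x ∈ l, x ≠ a → f x = []) : l.flatMap f = f a := by
  induction l with
  | nil => simp at ha
  | cons b t ih =>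
    rw [List.nodup_cons] at hnd
    rcases List.mem_cons.mp ha with rfl | hat
    · rw [List.flatMap_cons, pvFlatMap_nil t f
        (fun x hx => h x (by simp [hx]) (by rintro rfl; exact hnd.1 hx)), List.append_nil]
    · rw [List.flatMap_cons, h b (by simp) (by rintro rfl; exact hnd.1 hat)]
      simpa using ih hnd.2 hat (fun x hx hxa => h x (by simp [hx]) hxa)

theorem pvBucket_eq (cs : List Char) (m : Int) (hm2 : 2 ≤ m) (hmL : m ≤ (cs.length : Int)) :
    (pvGen cs).filter (fun t => decide ((t.toList.length : Int) = m))
    = (PySem.List.pyRange (m - 1) (cs.length : Int) 1).flatMap fun n =>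
        (PySem.List.pyRange n (cs.length : Int) 1).flatMap fun j =>
          [pvPiece cs (n - m + 1) n j] := by
  unfold pvGen
  rw [List.filter_flatMap]
  have hstep : ∀ n ∈ PySem.List.pyRange 1 (cs.length : Int) 1,
      ((PySem.List.pyRange 0 (cs.length : Int) 1).flatMap fun i =>
        (PySem.List.pyRange n (cs.length : Int) 1).flatMap fun j =>
          [pvPiece cs i n j]).filter (fun t => decide ((t.toList.length : Int) = m))
      = if m - 1 ≤ n then
          (PySem.List.pyRange n (cs.length : Int) 1).flatMap fun j =>
            [pvPiece cs (n - m + 1) n j]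
        else [] := by
    intro n hn
    rw [PySem.List.mem_pyRange_one] at hn
    rw [List.filter_flatMap]
    have hpiece : ∀ (i j : Int), 0 ≤ i →
        ((pvPiece cs i n j).toList.length : Int) = (n.toNat - i.toNat + 1 : Nat) := by
      intro i j hi
      rw [pvPiece_length cs i n j hi (by omega) (by omega)]
    by_cases hcase : m - 1 ≤ n
    · rw [pvFlatMap_single _ _ (n - m + 1) (PySem.List.nodup_pyRange_one 0 _)
        (by rw [PySem.List.mem_pyRange_one]; omega) ?_]
      · rw [if_pos hcase]
        rw [List.filter_flatMap]
        refine List.flatMap_congr ?_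
        intro j hj
        have := hpiece (n - m + 1) j (by omega)
        rw [List.filter_cons]
        simp only [List.filter_nil]
        rw [if_pos (by rw [this]; simp; omega)]
      · intro i hi hine
        rw [PySem.List.mem_pyRange_one] at hi
        rw [List.filter_flatMap]
        refine pvFlatMap_nil _ _ ?_
        intro j hj
        have := hpiece i j (by omega)
        rw [List.filter_cons]
        simp only [List.filter_nil]
        rw [if_neg]
        rw [this]
        simp only [decide_eq_true_eq]
        intro hc
        apply hine
        omega
    · rw [if_neg hcase]
      refine pvFlatMap_nil _ _ ?_
      intro i hi
      rw [PySem.List.mem_pyRange_one] at hi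
      rw [List.filter_flatMap]
      refine pvFlatMap_nil _ _ ?_
      intro j hj
      have := hpiece i j (by omega)
      rw [List.filter_cons]
      simp only [List.filter_nil]
      rw [if_neg]
      rw [this]
      simp only [decide_eq_true_eq]
      omega
  rw [List.flatMap_congr hstep]
  rw [PySem.List.pyRange_one_append 1 (m - 1) (cs.length : Int) (by omega) (by omega)]
  rw [List.flatMap_append]
  rw [pvFlatMap_nil (PySem.List.pyRange 1 (m - 1) 1) _ (by
    intro n hn
    rw [PySem.List.mem_pyRange_one] at hn
    rw [if_neg (by omega)])]
  rw [List.nil_append]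
  refine List.flatMap_congr ?_
  intro n hn
  rw [PySem.List.mem_pyRange_one] at hn
  rw [if_pos (by omega)]

theorem pvErase_none_filter (l : List (Option String)) :
    (l.erase none).filter Option.isSome = l.filter Option.isSome := by
  induction l with
  | nil => simp
  | cons a t ih =>
    by_cases ha : a = none
    · subst ha; simp [List.erase_cons]
    · have hs : a.isSome = true := Option.isSome_iff_ne_none.mpr ha
      have hb : (a == none) = false := by
        cases a with
        | none => exact absurd rfl ha
        | some s => rfl
      simp [List.erase_cons, hb, List.filter_cons, hs, ih]

theorem pvRemoveZeros_eq_filter (l : List (Option String)) :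
    pvRemoveZeros l = l.filter Option.isSome := by
  induction l using pvRemoveZeros.induct with
  | case1 l h ih =>
    rw [pvRemoveZeros, dif_pos h, ih, pvErase_none_filter]
  | case2 l h =>
    rw [pvRemoveZeros, dif_neg h]
    symm
    refine List.filter_eq_self.mpr ?_
    intro a ha
    cases a with
    | none => exact absurd ha h
    | some s => simp

theorem pvInsertBy_pass {α : Type} (bef : α → α → Bool) (x : α) (l1 l2 : List α)
    (h : ∀ y ∈ l1, bef x y = false) :
    PySem.List.insertBy bef x (l1 ++ l2) = l1 ++ PySem.List.insertBy bef x l2 := by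
  induction l1 with
  | nil => simp
  | cons a t ih =>
    simp only [List.cons_append, PySem.List.insertBy]
    rw [h a (by simp)]
    simp [ih (fun y hy => h y (by simp [hy]))]

theorem pvInsertBy_front {α : Type} (bef : α → α → Bool) (x : α) (l : List α)
    (h : ∀ y ∈ l, bef x y = true) :
    PySem.List.insertBy bef x l = x :: l := by
  cases l with
  | nil => simp [PySem.List.insertBy]
  | cons a t => simp [PySem.List.insertBy, h a (by simp)]

theorem pvInsertBy_flatMap {α : Type} (key : α → Int) (x : α) (xs : List α) (ms : List Int)
    (hms : ms.Pairwise (· < ·)) (hx : key x ∈ ms) :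
    PySem.List.insertBy (fun a b => decide (key a < key b)) x
      (ms.flatMap (fun m => xs.filter (fun y => decide (key y = m))))
    = ms.flatMap (fun m => (xs ++ [x]).filter (fun y => decide (key y = m))) := by
  induction ms with
  | nil => simp at hx
  | cons m rest ih =>
    rw [List.pairwise_cons] at hms
    obtain ⟨h1, h2⟩ := hms
    simp only [List.flatMap_cons]
    by_cases hxm : key x = m
    · rw [pvInsertBy_pass _ _ _ _ (by
        intro y hy
        simp only [List.mem_filter, decide_eq_true_eq] at hy
        simp [hy.2, hxm])]
      rw [pvInsertBy_front _ _ _ (by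
        intro y hy
        simp only [List.mem_flatMap, List.mem_filter, decide_eq_true_eq] at hy
        obtain ⟨r, hr, _, hkey⟩ := hy
        simp [hkey, hxm]
        exact h1 r hr)]
      rw [List.filter_append]
      have hrest : rest.flatMap (fun r => (xs ++ [x]).filter (fun y => decide (key y = r)))
          = rest.flatMap (fun r => xs.filter (fun y => decide (key y = r))) := by
        refine List.flatMap_congr ?_
        intro r hr
        rw [List.filter_append]
        have : key x ≠ r := by have := h1 r hr; omega
        simp [this]
      rw [hrest]
      simp [hxm]
    · have hxr : key x ∈ rest := by
        rcases List.mem_cons.mp hx with h | h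
        · exact absurd h hxm
        · exact h
      rw [pvInsertBy_pass _ _ _ _ (by
        intro y hy
        simp only [List.mem_filter, decide_eq_true_eq] at hy
        have := h1 _ hxr
        simp [hy.2]
        omega)]
      rw [ih h2 hxr]
      congr 1
      rw [List.filter_append]
      simp [hxm]

theorem pvSorted_buckets {α : Type} (key : α → Int) (xs : List α) (ms : List Int)
    (hms : ms.Pairwise (· < ·)) (hkeys : ∀ x ∈ xs, key x ∈ ms) :
    PySem.List.sorted xs key false
    = ms.flatMap (fun m => xs.filter (fun y => decide (key y = m))) := by
  rw [PySem.List.sorted_eq_foldl_insertBy]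
  induction xs using List.reverseRecOn with
  | nil => simp
  | append_singleton t x ih =>
    rw [List.foldl_append]
    simp only [List.foldl_cons, List.foldl_nil]
    rw [ih (fun y hy => hkeys y (by simp [hy]))]
    exact pvInsertBy_flatMap key x t ms hms (hkeys x (by simp))

theorem pvGen_len_le (cs : List Char) (t : String) (ht : t ∈ pvGen cs) :
    t.toList.length ≤ cs.length := by
  unfold pvGen at ht
  simp only [List.mem_flatMap, List.mem_singleton] at ht
  obtain ⟨n, hn, i, hi, j, hj, rfl⟩ := ht
  rw [PySem.List.mem_pyRange_one] at hn hi hj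
  rw [pvPiece_length cs i n j (by omega) (by omega) (by omega)]
  omega

theorem pvMain (s : String) : combinason s = combinason_alt s := by
  rw [pvCombinason_eq_gen, pvCombinason_alt_eq]
  unfold pvDelete
  rw [pvRemoveZeros_eq_filter]
  have h1 : ((pvGen s.toList).map pvMoreOneChar).filter Option.isSome
      = ((pvGen s.toList).filter (fun t => decide (1 < t.toList.length))).map some := by
    rw [List.filter_map]
    have hp : (Option.isSome ∘ pvMoreOneChar) = fun t => decide (1 < t.toList.length) := by
      funext t
      simp only [Function.comp_apply, pvMoreOneChar]
      by_cases h : 1 < t.toList.length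
      · rw [if_pos h, decide_eq_true h]; rfl
      · rw [if_neg h, decide_eq_false h]; rfl
    rw [hp]
    refine List.map_congr_left ?_
    intro t ht
    rw [List.mem_filter, decide_eq_true_eq] at ht
    unfold pvMoreOneChar
    rw [if_pos ht.2]
  rw [h1]
  have hkeys : ∀ o ∈ ((pvGen s.toList).filter (fun t => decide (1 < t.toList.length))).map some,
      (fun o : Option String => ((o.getD "").toList.length : Int)) o ∈
        PySem.List.pyRange 2 ((s.toList.length : Int) + 1) 1 := by
    intro o ho
    simp only [List.mem_map] at ho
    obtain ⟨t, ht, rfl⟩ := ho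
    rw [List.mem_filter, decide_eq_true_eq] at ht
    have := pvGen_len_le s.toList t ht.1
    rw [PySem.List.mem_pyRange_one]
    simp only [Option.getD_some]
    omega
  rw [pvSorted_buckets _ _ _ (PySem.List.pairwise_lt_pyRange_one _ _) hkeys]
  · rw [List.map_flatMap]
    refine List.flatMap_congr ?_
    intro m hm
    rw [PySem.List.mem_pyRange_one] at hm
    rw [List.filter_map]
    rw [List.map_map]
    have hcomp : ((fun o => o.getD "") ∘ some : String → String) = id := rfl
    rw [hcomp, List.map_id]
    have hps : ((fun o => decide (((o.getD "" : String).toList.length : Int) = m)) ∘ some)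
        = fun t : String => decide ((t.toList.length : Int) = m) := rfl
    rw [hps, List.filter_filter]
    have hfc : (pvGen s.toList).filter
          (fun a => decide ((a.toList.length : Int) = m) && decide (1 < a.toList.length))
        = (pvGen s.toList).filter (fun a => decide ((a.toList.length : Int) = m)) := by
      refine List.filter_congr ?_
      intro a _
      by_cases hla : (a.toList.length : Int) = m
      · rw [decide_eq_true hla, decide_eq_true (show 1 < a.toList.length by omega)]; rfl
      · rw [decide_eq_false hla]; rfl
    rw [hfc]
    exact pvBucket_eq s.toList m (by omega) (by omega)

-- ===== VERDICT (by name: the statement is the Claim_ definition above) =====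
theorem combinason_spec : Claim_equal_combinason := by
  intro s _
  unfold Spec_combinason
  exact pvMain s
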